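-- pv_equiv track=rewrite | github.com/seanchatmangpt/erlmcp | analyze_test_gaps.py | identify_missing_tests
-- ===== SOURCE A (Python) =====
-- from typing import Dict, List, Set, Tuple
--
-- def identify_missing_tests(source_modules: Dict[str, List[str]],
--                           test_modules: Dict[str, List[str]]) -> Dict[str, List[str]]:
--     """Identify source modules without corresponding test files"""
--     missing_tests = {}
--
--     for app_name, modules in source_modules.items():
--         app_tests = test_modules.get(app_name, [])
--
--         # Extract base names from test files (remove _tests, _SUITE suffixes)
--         tested_modules = set()
--         for test_name in app_tests:
--             # Handle various test naming patterns
--             if test_name.endswith("_tests"):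
--                 tested_modules.add(test_name[:-6])
--             elif test_name.endswith("_SUITE"):
--                 tested_modules.add(test_name[:-6])
--             elif "_tests" in test_name:
--                 # Handle names like erlmcp_auth_api_tests
--                 parts = test_name.split("_tests")[0]
--                 tested_modules.add(parts)
--
--         # Find modules without tests
--         missing = []
--         for module in modules:
--             # Skip supervisors, apps, and behaviors (often don't need dedicated tests)
--             if module.endswith("_sup") or module.endswith("_app") or module.endswith("_behavior"):
--                 continue
--
--             # Check if module has a corresponding test
--             has_test = False
--             for tested in tested_modules:
--                 if module.startswith(tested) or tested.startswith(module):
--                     has_test = True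
--                     break
--
--             if not has_test:
--                 missing.append(module)
--
--         if missing:
--             missing_tests[app_name] = sorted(missing)
--
--     return missing_tests
-- ===== SOURCE B (Python) =====
-- def _base(test_name):
--     """Base module name a test file covers, or None if it is not a test name."""
--     if test_name.endswith("_tests") or test_name.endswith("_SUITE"):
--         return test_name[:-6]
--     if "_tests" in test_name:
--         return test_name.split("_tests")[0]
--     return None
--
--
-- def _covered(module, bases, pool):
--     """module matches some base by prefix in either direction."""
--     if module in pool:          # module is a prefix of some tested base
--         return True
--     # some tested base is a proper prefix of module
--     return any(module[:i] in bases for i in range(len(module)))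
--
--
-- def identify_missing_tests(source_modules, test_modules):
--     """Identify source modules without corresponding test files"""
--     missing_tests = {}
--     for app_name, modules in source_modules.items():
--         bases = {b for b in map(_base, test_modules.get(app_name, [])) if b is not None}
--         # every prefix of every tested base: prefix matches in either direction become membership tests
--         pool = {b[:i] for b in bases for i in range(len(b) + 1)}
--         missing = sorted(
--             m for m in modules
--             if not (m.endswith("_sup") or m.endswith("_app") or m.endswith("_behavior"))
--             and not _covered(m, bases, pool)
--         )
--         if missing:
--             missing_tests[app_name] = missing
--     return missing_tests
-- ===== Notes on version B (the rewrite author's own statement) =====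
-- stated objective: alternative
-- what changed: B replaces A's per-module scan over all tested base names (a two-direction prefix test against every base) with a precomputed set of all prefixes of the tested bases, deciding each module by membership tests on its own prefixes; measured cost is similar on the generated inputs.
import Mathlib
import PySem

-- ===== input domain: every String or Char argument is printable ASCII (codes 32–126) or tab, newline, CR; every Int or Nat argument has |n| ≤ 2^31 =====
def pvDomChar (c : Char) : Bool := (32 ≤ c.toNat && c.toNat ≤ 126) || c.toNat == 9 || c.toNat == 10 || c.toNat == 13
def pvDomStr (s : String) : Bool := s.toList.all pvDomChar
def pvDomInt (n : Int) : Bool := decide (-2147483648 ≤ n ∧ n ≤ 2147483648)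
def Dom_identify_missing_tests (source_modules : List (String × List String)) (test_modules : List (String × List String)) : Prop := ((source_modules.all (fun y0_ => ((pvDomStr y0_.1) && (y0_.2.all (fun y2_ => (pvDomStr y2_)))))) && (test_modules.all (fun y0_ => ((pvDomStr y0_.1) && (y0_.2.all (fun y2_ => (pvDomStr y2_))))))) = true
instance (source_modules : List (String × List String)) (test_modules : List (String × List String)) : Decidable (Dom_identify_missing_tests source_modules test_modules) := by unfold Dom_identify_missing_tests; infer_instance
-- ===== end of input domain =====

-- B replaces A's inner scan over all tested base names (a two-direction prefix test per
-- module against every base) by a precomputed set of all prefixes of the tested bases,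
-- so each module is decided by membership tests on its own prefixes (alternative algorithm).

-- dict.get(k, []) on an association list: first match
def pvGetTests (tm : List (String × List String)) (k : String) : List String :=
  match tm.find? (fun p => p.1 == k) with
  | some p => p.2
  | none => []

-- ===== PORT A =====
-- the tested_modules-building loop (test_name.split("_tests")[0]: split? is some for the
-- nonempty separator and never yields [], so getD/headD are exact)
def pvTestedA (app_tests : List String) : PySem.Set String :=
  app_tests.foldl (fun s test_name =>
    if PySem.Str.endswith test_name "_tests" then
      PySem.Set.add s (PySem.Str.slice test_name none (some (-6)))
    else if PySem.Str.endswith test_name "_SUITE" then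
      PySem.Set.add s (PySem.Str.slice test_name none (some (-6)))
    else if PySem.Str.isIn "_tests" test_name then
      PySem.Set.add s (((PySem.Str.split? test_name "_tests").getD []).headD "")
    else s) PySem.Set.empty

-- the body of A's outer loop
def pvStepA (test_modules : List (String × List String))
    (missing_tests : PySem.Dict String (List String)) (entry : String × List String) :
    PySem.Dict String (List String) :=
  let app_name := entry.1
  let modules := entry.2
  let app_tests := pvGetTests test_modules app_name
  let tested_modules := pvTestedA app_tests
  let missing := modules.foldl (fun acc module =>
    if PySem.Str.endswith module "_sup" || PySem.Str.endswith module "_app" || PySem.Str.endswith module "_behavior" then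
      acc
    else
      -- 'for tested in tested_modules: … break' only sets a Bool: an order-independent any over the set
      let has_test := tested_modules.any (fun tested =>
        PySem.Str.startswith module tested || PySem.Str.startswith tested module)
      if !has_test then acc ++ [module] else acc) []
  if missing ≠ [] then
    missing_tests.insert app_name (PySem.List.sorted missing (fun x => x) false)
  else missing_tests

def identify_missing_tests (source_modules : List (String × List String)) (test_modules : List (String × List String)) : List (String × List String) :=
  (source_modules.foldl (pvStepA test_modules) PySem.Dict.empty).items

-- ===== PORT B =====
def pvBase (test_name : String) : Option String :=
  if PySem.Str.endswith test_name "_tests" || PySem.Str.endswith test_name "_SUITE" then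
    some (PySem.Str.slice test_name none (some (-6)))
  else if PySem.Str.isIn "_tests" test_name then
    some (((PySem.Str.split? test_name "_tests").getD []).headD "")
  else none

def pvPool (bases : PySem.Set String) : PySem.Set String :=
  PySem.Set.ofList (bases.flatMap (fun b =>
    (PySem.List.pyRange 0 (PySem.Str.len b + 1) 1).map (fun i => PySem.Str.slice b none (some i))))

def pvCovered (module : String) (bases pool : PySem.Set String) : Bool :=
  if PySem.Set.contains pool module then true
  else (PySem.List.pyRange 0 (PySem.Str.len module) 1).any (fun i =>
    PySem.Set.contains bases (PySem.Str.slice module none (some i)))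

-- the body of B's outer loop
def pvStepB (test_modules : List (String × List String))
    (missing_tests : PySem.Dict String (List String)) (entry : String × List String) :
    PySem.Dict String (List String) :=
  let app_name := entry.1
  let modules := entry.2
  let bases := PySem.Set.ofList ((pvGetTests test_modules app_name).filterMap pvBase)
  let pool := pvPool bases
  let missing := PySem.List.sorted (modules.filter (fun m =>
    !(PySem.Str.endswith m "_sup" || PySem.Str.endswith m "_app" || PySem.Str.endswith m "_behavior")
      && !pvCovered m bases pool)) (fun x => x) false
  if missing ≠ [] then missing_tests.insert app_name missing else missing_tests

def identify_missing_tests_alt (source_modules : List (String × List String)) (test_modules : List (String × List String)) : List (String × List String) :=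
  (source_modules.foldl (pvStepB test_modules) PySem.Dict.empty).items

-- ===== PRECONDITION & SPEC =====
def Spec_identify_missing_tests (source_modules : List (String × List String)) (test_modules : List (String × List String)) (out : List (String × List String)) : Prop := out = identify_missing_tests_alt source_modules test_modules
instance (source_modules : List (String × List String)) (test_modules : List (String × List String)) (out : List (String × List String)) : Decidable (Spec_identify_missing_tests source_modules test_modules out) := by unfold Spec_identify_missing_tests; infer_instance

-- ===== CLAIM (what is proved, stated in full; the proofs are below) =====
def Claim_equal_identify_missing_tests : Prop := ∀ (source_modules : List (String × List String)) (test_modules : List (String × List String)), Dom_identify_missing_tests source_modules test_modules → Spec_identify_missing_tests source_modules test_modules (identify_missing_tests source_modules test_modules)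

-- ===== LEMMAS AND PROOFS =====

-- A's if-elif chain adds exactly the pvBase value
theorem pvAddGen (c1 c2 c3 : Bool) (x y : String) (s : PySem.Set String) :
    (if c1 then PySem.Set.add s x else if c2 then PySem.Set.add s x
      else if c3 then PySem.Set.add s y else s)
    = (match (if c1 || c2 then some x else if c3 then some y else none) with
        | some b => PySem.Set.add s b | none => s) := by
  cases c1 <;> cases c2 <;> cases c3 <;> rfl

theorem pvFoldl_filterMap (f : String → Option String)
    (step : PySem.Set String → String → PySem.Set String)
    (hstep : ∀ (s : PySem.Set String) (t : String),
      step s t = match f t with | some b => PySem.Set.add s b | none => s) :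
    ∀ (l : List String) (s : PySem.Set String),
      l.foldl step s = (l.filterMap f).foldl PySem.Set.add s := by
  intro l
  induction l with
  | nil => intro s; rfl
  | cons t rest ih =>
    intro s
    rw [List.foldl_cons, hstep, List.filterMap_cons]
    cases h : f t
    · exact ih s
    · rw [List.foldl_cons]; exact ih _

-- A's set-building loop is Set.ofList of the filterMap by pvBase
theorem pvTestedA_eq (app_tests : List String) :
    pvTestedA app_tests = PySem.Set.ofList (app_tests.filterMap pvBase) := by
  rw [pvTestedA, PySem.Set.ofList_eq_foldl]
  exact pvFoldl_filterMap pvBase _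
    (fun s t => by rw [pvBase]; exact pvAddGen _ _ _ _ _ _) app_tests PySem.Set.empty

-- x is obtained by slicing b to some admissible length iff x is a prefix of b
theorem pvSlice_prefix_iff (x b : String) :
    (∃ i : Int, 0 ≤ i ∧ i < (b.toList.length : Int) + 1 ∧ x = PySem.Str.slice b none (some i))
      ↔ x.toList <+: b.toList := by
  constructor
  · rintro ⟨i, h0, _, rfl⟩
    rw [PySem.Str.toList_slice, PySem.Chars.slice_eq_listSlice, PySem.List.slice_to _ h0]
    exact List.take_prefix _ _
  · intro h
    refine ⟨(x.toList.length : Int), by positivity, ?_, ?_⟩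
    · exact_mod_cast Nat.lt_succ_of_le h.length_le
    · rw [← String.toList_inj, PySem.Str.toList_slice, PySem.Chars.slice_eq_listSlice,
        PySem.List.slice_to _ (by positivity)]
      simpa using List.prefix_iff_eq_take.mp h

theorem pvMem_pool (bases : PySem.Set String) (m : String) :
    m ∈ pvPool bases ↔ ∃ b ∈ bases, m.toList <+: b.toList := by
  rw [pvPool, PySem.Set.mem_ofList]
  simp only [List.mem_flatMap, List.mem_map]
  constructor
  · rintro ⟨b, hb, i, hi, hslice⟩
    rw [PySem.List.mem_pyRange_one] at hi
    refine ⟨b, hb, (pvSlice_prefix_iff m b).mp ⟨i, hi.1, ?_, hslice.symm⟩⟩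
    have hlb : PySem.Str.len b = (b.toList.length : Int) := by simp [PySem.Str.len_eq]
    omega
  · rintro ⟨b, hb, hpre⟩
    obtain ⟨i, h0, hlt, hx⟩ := (pvSlice_prefix_iff m b).mpr hpre
    refine ⟨b, hb, i, ?_, hx.symm⟩
    rw [PySem.List.mem_pyRange_one]
    have hlb : PySem.Str.len b = (b.toList.length : Int) := by simp [PySem.Str.len_eq]
    omega

theorem pvProper_iff (bases : PySem.Set String) (m : String) :
    ((PySem.List.pyRange 0 (PySem.Str.len m) 1).any (fun i =>
        PySem.Set.contains bases (PySem.Str.slice m none (some i))) = true)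
      ↔ ∃ t ∈ bases, t.toList <+: m.toList ∧ t.toList.length < m.toList.length := by
  have hlen : PySem.Str.len m = (m.toList.length : Int) := by simp [PySem.Str.len_eq]
  rw [List.any_eq_true]
  constructor
  · rintro ⟨i, hi, hc⟩
    rw [PySem.List.mem_pyRange_one, hlen] at hi
    rw [PySem.Set.contains_iff] at hc
    refine ⟨_, hc, ?_, ?_⟩
    · rw [PySem.Str.toList_slice, PySem.Chars.slice_eq_listSlice, PySem.List.slice_to _ hi.1]
      exact List.take_prefix _ _
    · rw [PySem.Str.toList_slice, PySem.Chars.slice_eq_listSlice, PySem.List.slice_to _ hi.1]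
      rw [List.length_take]
      omega
  · rintro ⟨t, ht, hpre, hlt⟩
    refine ⟨(t.toList.length : Int), ?_, ?_⟩
    · rw [PySem.List.mem_pyRange_one, hlen]
      exact ⟨by positivity, by exact_mod_cast hlt⟩
    · rw [PySem.Set.contains_iff]
      have hsl : PySem.Str.slice m none (some (t.toList.length : Int)) = t := by
        rw [← String.toList_inj, PySem.Str.toList_slice, PySem.Chars.slice_eq_listSlice,
          PySem.List.slice_to _ (by positivity)]
        simpa using (List.prefix_iff_eq_take.mp hpre).symm
      rw [hsl]
      exact ht

-- the crux: A's two-direction prefix scan over the bases equals B's pool/prefix membership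
theorem pvAny_eq_covered (m : String) (bases : PySem.Set String) :
    bases.any (fun t => PySem.Str.startswith m t || PySem.Str.startswith t m)
      = pvCovered m bases (pvPool bases) := by
  rw [Bool.eq_iff_iff]
  rw [List.any_eq_true]
  have hcov : pvCovered m bases (pvPool bases) = true ↔
      PySem.Set.contains (pvPool bases) m = true ∨
      ((PySem.List.pyRange 0 (PySem.Str.len m) 1).any (fun i =>
        PySem.Set.contains bases (PySem.Str.slice m none (some i))) = true) := by
    rw [pvCovered]
    by_cases hp : PySem.Set.contains (pvPool bases) m = true
    · simp [hp]
    · simp [hp]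
  rw [hcov, PySem.Set.contains_iff, pvMem_pool, pvProper_iff]
  constructor
  · rintro ⟨t, ht, hor⟩
    rw [Bool.or_eq_true, PySem.Str.startswith_eq, PySem.Str.startswith_eq,
      PySem.Chars.startswith_iff, PySem.Chars.startswith_iff] at hor
    rcases hor with h | h
    · -- t is a prefix of m
      rcases Nat.lt_or_ge t.toList.length m.toList.length with hlt | hge
      · exact Or.inr ⟨t, ht, h, hlt⟩
      · have heq : t.toList = m.toList := h.eq_of_length (le_antisymm h.length_le hge)
        exact Or.inl ⟨t, ht, heq ▸ List.prefix_refl _⟩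
    · exact Or.inl ⟨t, ht, h⟩
  · rintro (⟨b, hb, hpre⟩ | ⟨t, ht, hpre, _⟩)
    · refine ⟨b, hb, ?_⟩
      rw [Bool.or_eq_true, PySem.Str.startswith_eq, PySem.Chars.startswith_iff]
      exact Or.inr (by rw [PySem.Str.startswith_eq, PySem.Chars.startswith_iff]; exact hpre)
    · refine ⟨t, ht, ?_⟩
      rw [Bool.or_eq_true, PySem.Str.startswith_eq, PySem.Chars.startswith_iff]
      exact Or.inl hpre

theorem pvStep_eq (test_modules : List (String × List String)) :
    pvStepA test_modules = pvStepB test_modules := by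
  funext d entry
  simp only [pvStepA, pvStepB]
  have hbases := pvTestedA_eq (pvGetTests test_modules entry.1)
  set bases := PySem.Set.ofList ((pvGetTests test_modules entry.1).filterMap pvBase) with hb
  -- A's accumulation loop is the filter by B's predicate
  have hfun : (fun (acc : List String) module =>
      if PySem.Str.endswith module "_sup" || PySem.Str.endswith module "_app" || PySem.Str.endswith module "_behavior" then
        acc
      else
        let has_test := (pvTestedA (pvGetTests test_modules entry.1)).any (fun tested =>
          PySem.Str.startswith module tested || PySem.Str.startswith tested module)
        if !has_test then acc ++ [module] else acc)
      = (fun acc m =>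
        if (!(PySem.Str.endswith m "_sup" || PySem.Str.endswith m "_app" || PySem.Str.endswith m "_behavior")
          && !pvCovered m bases (pvPool bases)) then acc ++ [m] else acc) := by
    funext acc m
    rw [hbases, pvAny_eq_covered m bases]
    cases hskip : (PySem.Str.endswith m "_sup" || PySem.Str.endswith m "_app" || PySem.Str.endswith m "_behavior")
    · cases hcov : pvCovered m bases (pvPool bases) <;> rfl
    · rfl
  rw [hfun, PySem.List.foldl_append_if_eq_filter]
  simp only [List.nil_append, ne_eq, PySem.List.sorted_eq_nil_iff]

theorem identify_missing_tests_eq (source_modules : List (String × List String)) (test_modules : List (String × List String)) :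
    identify_missing_tests source_modules test_modules = identify_missing_tests_alt source_modules test_modules := by
  rw [identify_missing_tests, identify_missing_tests_alt, pvStep_eq]

-- ===== VERDICT (by name: the statement is the Claim_ definition above) =====
theorem identify_missing_tests_spec : Claim_equal_identify_missing_tests := by
  intro sm tm _
  unfold Spec_identify_missing_tests
  exact identify_missing_tests_eq sm tm
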